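-- pv_equiv track=rewrite | github.com/henrcaio/Projeto_Lattes_Mateus | projv4.py | formatar_formacao
-- ===== SOURCE A (Python) =====
-- def formatar_formacao(formacao):
--     formacao_formatada = []
--
--     # Se formacao for um dicionário, transforme-o em uma lista
--     if isinstance(formacao, dict):
--         formacao = [formacao]
--
--     niveis = ["GRADUACAO", "MESTRADO", "DOUTORADO", "POS-DOUTORADO"]
--
--     for nivel in niveis:
--         for item in formacao:
--             if isinstance(item, dict) and item.get("@NIVEL") == str(
--                 niveis.index(nivel) + 1
--             ):
--                 instituicao = item.get("@NOME-INSTITUICAO", "N/A")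
--                 curso = item.get("@NOME-CURSO", "N/A")
--                 ano_inicio = item.get("@ANO-DE-INICIO", "N/A")
--                 ano_conclusao = item.get("@ANO-DE-CONCLUSAO", "N/A")
--                 resumo = f"{nivel} - {curso} ({instituicao}) - Início: {ano_inicio}, Conclusão: {ano_conclusao}"
--                 formacao_formatada.append(resumo)
--
--     if not formacao_formatada:
--         return "Nenhuma formação acadêmica encontrada."
--
--     return "\n".join(formacao_formatada)
-- ===== SOURCE B (Python) =====
-- def formatar_formacao(formacao):
--     if isinstance(formacao, dict):
--         formacao = [formacao]
--
--     niveis = ["GRADUACAO", "MESTRADO", "DOUTORADO", "POS-DOUTORADO"]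
--
--     # one indexing pass: (level key, formatted fields) for each dict item
--     pairs = [
--         (item.get("@NIVEL"),
--          (item.get("@NOME-CURSO", "N/A"),
--           item.get("@NOME-INSTITUICAO", "N/A"),
--           item.get("@ANO-DE-INICIO", "N/A"),
--           item.get("@ANO-DE-CONCLUSAO", "N/A")))
--         for item in formacao if isinstance(item, dict)
--     ]
--     buckets = {}
--     for k, v in pairs:
--         buckets.setdefault(k, []).append(v)
--
--     # one emit pass in the fixed level order
--     linhas = []
--     for i, nivel in enumerate(niveis):
--         for curso, inst, ini, fim in buckets.get(str(i + 1), []):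
--             linhas.append(f"{nivel} - {curso} ({inst}) - Início: {ini}, Conclusão: {fim}")
--
--     if not linhas:
--         return "Nenhuma formação acadêmica encontrada."
--     return "\n".join(linhas)
-- ===== Notes on version B (the rewrite author's own statement) =====
-- stated objective: idiomatic
-- what changed: B replaces A's four full re-scans of formacao (one per level, with a niveis.index call per level) by a single indexing pass that groups each item's formatted fields into a dict keyed by @NIVEL, followed by one emit pass over the fixed level list.
import Mathlib
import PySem

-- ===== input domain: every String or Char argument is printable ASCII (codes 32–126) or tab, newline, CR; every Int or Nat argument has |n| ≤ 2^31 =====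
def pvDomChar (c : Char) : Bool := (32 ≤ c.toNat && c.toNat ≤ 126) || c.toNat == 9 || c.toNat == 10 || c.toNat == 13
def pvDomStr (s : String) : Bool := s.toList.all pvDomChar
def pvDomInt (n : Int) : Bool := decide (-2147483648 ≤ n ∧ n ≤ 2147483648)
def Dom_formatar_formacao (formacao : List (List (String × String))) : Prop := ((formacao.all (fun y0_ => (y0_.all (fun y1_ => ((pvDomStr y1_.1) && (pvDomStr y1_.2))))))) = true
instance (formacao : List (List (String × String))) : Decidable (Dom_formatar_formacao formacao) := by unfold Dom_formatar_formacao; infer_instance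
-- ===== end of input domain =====

-- B builds a per-level index of the formatted fields in one pass and then emits in the
-- fixed level order, instead of A's re-scan of the whole list for each level (objective: idiomatic).

-- ===== PORT A =====
-- the f-string of A
def pvFmt (nivel curso inst ai ac : String) : String :=
  nivel ++ " - " ++ curso ++ " (" ++ inst ++ ") - Início: " ++ ai ++ ", Conclusão: " ++ ac

def formatar_formacao (formacao : List (List (String × String))) : String :=
  let niveis : List String := ["GRADUACAO", "MESTRADO", "DOUTORADO", "POS-DOUTORADO"]
  let ff : List String := niveis.foldl (fun acc nivel =>
    formacao.foldl (fun acc item =>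
      let d := PySem.Dict.mk item
      -- niveis.index(nivel) always succeeds (nivel ∈ niveis); getD 0 only makes the port total
      if d.get? "@NIVEL" == some (PySem.Int.toStr (((PySem.List.index? niveis nivel).getD 0 : Nat) + 1)) then
        acc ++ [pvFmt nivel (d.getD "@NOME-CURSO" "N/A") (d.getD "@NOME-INSTITUICAO" "N/A")
                  (d.getD "@ANO-DE-INICIO" "N/A") (d.getD "@ANO-DE-CONCLUSAO" "N/A")]
      else acc) acc) []
  if ff = [] then "Nenhuma formação acadêmica encontrada." else PySem.Str.join "\n" ff

-- ===== PORT B =====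
def pvFields (item : List (String × String)) : String × String × String × String :=
  let d := PySem.Dict.mk item
  (d.getD "@NOME-CURSO" "N/A", d.getD "@NOME-INSTITUICAO" "N/A",
   d.getD "@ANO-DE-INICIO" "N/A", d.getD "@ANO-DE-CONCLUSAO" "N/A")

def pvFmtB (nivel : String) (v : String × String × String × String) : String :=
  nivel ++ " - " ++ v.1 ++ " (" ++ v.2.1 ++ ") - Início: " ++ v.2.2.1 ++ ", Conclusão: " ++ v.2.2.2

def formatar_formacao_alt (formacao : List (List (String × String))) : String :=
  let niveis : List String := ["GRADUACAO", "MESTRADO", "DOUTORADO", "POS-DOUTORADO"]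
  let pairs : List (Option String × (String × String × String × String)) :=
    formacao.map (fun item => ((PySem.Dict.mk item).get? "@NIVEL", pvFields item))
  let buckets := pairs.foldl (fun d p => d.modify p.1 [] (· ++ [p.2])) PySem.Dict.empty
  let linhas : List String := (PySem.List.enumerate niveis).foldl (fun acc p =>
      acc ++ (buckets.getD (some (PySem.Int.toStr (p.1 + 1))) []).map (pvFmtB p.2)) []
  if linhas = [] then "Nenhuma formação acadêmica encontrada." else PySem.Str.join "\n" linhas

-- ===== PRECONDITION & SPEC =====
def Spec_formatar_formacao (formacao : List (List (String × String))) (out : String) : Prop := out = formatar_formacao_alt formacao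
instance (formacao : List (List (String × String))) (out : String) : Decidable (Spec_formatar_formacao formacao out) := by unfold Spec_formatar_formacao; infer_instance

-- ===== CLAIM (what is proved, stated in full; the proofs are below) =====
def Claim_equal_formatar_formacao : Prop := ∀ (formacao : List (List (String × String))), Dom_formatar_formacao formacao → Spec_formatar_formacao formacao (formatar_formacao formacao)

-- ===== LEMMAS AND PROOFS =====

-- one bucket of B = one filtered pass of A, via the grouping lemma
theorem pv_bucket (formacao : List (List (String × String))) (s : String) :
    ((formacao.map (fun item => ((PySem.Dict.mk item).get? "@NIVEL", pvFields item))).foldl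
        (fun d p => d.modify p.1 [] (· ++ [p.2])) PySem.Dict.empty).getD (some s) []
      = (formacao.filter (fun item => (PySem.Dict.mk item).get? "@NIVEL" == some s)).map pvFields := by
  rw [PySem.Dict.getD_foldl_modify_append]
  simp [List.filter_map, Function.comp_def]

theorem pv_seg (formacao : List (List (String × String))) (nivel s : String) (acc : List String) :
    formacao.foldl (fun acc item =>
      let d := PySem.Dict.mk item
      if d.get? "@NIVEL" == some s then
        acc ++ [pvFmt nivel (d.getD "@NOME-CURSO" "N/A") (d.getD "@NOME-INSTITUICAO" "N/A")
                  (d.getD "@ANO-DE-INICIO" "N/A") (d.getD "@ANO-DE-CONCLUSAO" "N/A")]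
      else acc) acc
      = acc ++ ((formacao.filter (fun item => (PySem.Dict.mk item).get? "@NIVEL" == some s)).map pvFields).map (pvFmtB nivel) := by
  have hfun : (fun (acc : List String) (item : List (String × String)) =>
      let d := PySem.Dict.mk item
      if d.get? "@NIVEL" == some s then
        acc ++ [pvFmt nivel (d.getD "@NOME-CURSO" "N/A") (d.getD "@NOME-INSTITUICAO" "N/A")
                  (d.getD "@ANO-DE-INICIO" "N/A") (d.getD "@ANO-DE-CONCLUSAO" "N/A")]
      else acc)
      = (fun acc item =>
        if (PySem.Dict.mk item).get? "@NIVEL" == some s then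
          acc ++ [pvFmtB nivel (pvFields item)] else acc) := by
    funext acc item
    simp [pvFmt, pvFmtB, pvFields]
  rw [hfun, PySem.List.foldl_append_if
        (p := fun item => (PySem.Dict.mk item).get? "@NIVEL" == some s)
        (f := fun item => pvFmtB nivel (pvFields item))]
  simp [List.map_map, Function.comp_def]

-- ===== VERDICT (by name: the statement is the Claim_ definition above) =====
theorem formatar_formacao_spec : Claim_equal_formatar_formacao := by
  intro formacao _
  show formatar_formacao formacao = formatar_formacao_alt formacao
  unfold formatar_formacao formatar_formacao_alt
  simp only [PySem.List.enumerate, List.foldl]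
  rw [pv_bucket, pv_bucket, pv_bucket, pv_bucket, pv_seg, pv_seg, pv_seg, pv_seg]
  rfl
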